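-- pv_equiv track=rewrite | github.com/shoredata/galvanize-dsi | dsi-week-zero/day-2-collections-and-iteration/solutions/functions.py | group_by_10s
-- ===== SOURCE A (Python) =====
-- def group_by_10s(numbers):
--     '''Takes a list of numbers and groups the numbers by their tens place, giving
--     every tens place it's own sublist. E.g.
--
--     $ group_by_10s([1, 10, 15, 20])
--     [[1], [10, 15], [20]]
--     $ group_by_10s([8, 12, 3, 17, 19, 24, 35, 50])
--     [[3, 8], [12, 17, 19], [24], [35], [], [50]]
--
--     Parameters
--     ----------
--     numbers: int
--       A list of integers.
--
--     Returns
--     -------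
--     grouped: list of lists.
--       List of lists of integers.  Each inner list collects all the values in
--       the original list that share a tens digit.
--     '''
--     #all methods on arrays work on memory in place, and they
--     # return None!!!!
--     numbers.sort()
--     organized = []
--     maxn = (numbers[-1]) // 10 + 1
--     for i in range(maxn):
--         row = []
--         for item in numbers:
--             if item >= i*10 and item < (i+1)*10:
--                 row.append(item)
--         organized.append(row)
--     return organized
-- ===== SOURCE B (Python) =====
-- def group_by_10s(numbers):
--     # Sort once (in place, like A), then group with a dict keyed by the tens
--     # digit in a single pass, and read the buckets back for 0..max//10.
--     numbers.sort()
--     groups = {}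
--     for item in numbers:
--         groups.setdefault(item // 10, []).append(item)
--     return [groups.get(i, []) for i in range(max(numbers) // 10 + 1)]
-- ===== Notes on version B (the rewrite author's own statement) =====
-- stated objective: faster
-- what changed: Replaces the per-bucket rescan of the whole list (one filtering pass over numbers for every tens value up to max//10) by a dict of buckets built in a single pass over the sorted list and read back with get(i, []).
-- outside the precondition, e.g. on group_by_10s([]): A raises IndexError, B raises ValueError
import Mathlib
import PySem

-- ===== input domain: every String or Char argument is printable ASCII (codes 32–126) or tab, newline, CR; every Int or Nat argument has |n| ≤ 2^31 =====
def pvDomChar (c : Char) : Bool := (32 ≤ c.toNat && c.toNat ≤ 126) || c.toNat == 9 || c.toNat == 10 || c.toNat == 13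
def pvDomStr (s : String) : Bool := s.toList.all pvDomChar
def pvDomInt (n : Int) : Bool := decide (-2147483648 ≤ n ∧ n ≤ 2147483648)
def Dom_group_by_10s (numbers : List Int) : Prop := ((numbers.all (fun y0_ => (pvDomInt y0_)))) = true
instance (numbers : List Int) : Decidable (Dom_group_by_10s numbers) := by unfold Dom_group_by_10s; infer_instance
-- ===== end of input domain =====

-- B replaces A's per-bucket rescan by a dict of buckets keyed on item // 10,
-- built in one pass over the sorted list; both sort `numbers` in place — the
-- equivalence proved is about the return value (the mutation is identical).

-- ===== PORT A =====
def group_by_10s (numbers : List Int) : List (List Int) :=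
  let srt := PySem.List.sorted numbers (fun x => x) false
  match PySem.List.pyGet? srt (-1) with
  | none => []  -- Python raises IndexError here; excluded by Pre_
  | some last =>
    let maxn := PySem.Int.floordiv last 10 + 1
    (PySem.List.pyRange 0 maxn 1).foldl (fun organized i =>
      organized ++ [srt.foldl (fun row item =>
        if item ≥ i * 10 ∧ item < (i + 1) * 10 then row ++ [item] else row) []]) []

-- ===== PORT B =====
def group_by_10s_alt (numbers : List Int) : List (List Int) :=
  let srt := PySem.List.sorted numbers (fun x => x) false
  let groups : PySem.Dict Int (List Int) :=
    srt.foldl (fun d item =>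
      PySem.Dict.modify d (PySem.Int.floordiv item 10) [] (fun g => g ++ [item]))
      PySem.Dict.empty
  match PySem.List.max? numbers (fun x => x) with
  | none => []  -- Python raises ValueError here; excluded by Pre_
  | some m =>
    (PySem.List.pyRange 0 (PySem.Int.floordiv m 10 + 1) 1).map
      (fun i => PySem.Dict.getD groups i [])

-- ===== PRECONDITION & SPEC =====
-- A indexes the last element of the sorted list, raising IndexError on the empty list, which Pre_ excludes.
def Pre_group_by_10s (numbers : List Int) : Prop := numbers ≠ []
instance (numbers : List Int) : Decidable (Pre_group_by_10s numbers) := by unfold Pre_group_by_10s; infer_instance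
def pvWitness_group_by_10s : List Int := [8, 12, 3, 17, 19, 24, 35, 50]

def Spec_group_by_10s (numbers : List Int) (out : List (List Int)) : Prop := out = group_by_10s_alt numbers
instance (numbers : List Int) (out : List (List Int)) : Decidable (Spec_group_by_10s numbers out) := by unfold Spec_group_by_10s; infer_instance

-- ===== CLAIM (what is proved, stated in full; the proofs are below) =====
def Claim_equal_group_by_10s : Prop := ∀ (numbers : List Int), Dom_group_by_10s numbers → Pre_group_by_10s numbers → Spec_group_by_10s numbers (group_by_10s numbers)

-- ===== LEMMAS AND PROOFS =====

-- max(numbers) is the last element of sorted(numbers).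
lemma pvMax_eq_getLast (numbers : List Int) (h : numbers ≠ []) :
    PySem.List.max? numbers (fun x => x) =
      (PySem.List.sorted numbers (fun x => x) false).getLast? := by
  have hne : (PySem.List.sorted numbers (fun x => x) false) ≠ [] := by
    simpa [PySem.List.sorted_eq_nil_iff] using h
  obtain ⟨m, hm⟩ : ∃ m, PySem.List.max? numbers (fun x => x) = some m := by
    cases hx : PySem.List.max? numbers (fun x => x) with
    | none => exact absurd ((PySem.List.max?_eq_none_iff numbers (fun x => x)).mp hx) h
    | some m => exact ⟨m, rfl⟩
  rw [hm, List.getLast?_eq_some_getLast hne, Option.some_inj]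
  have hpos : 0 < (PySem.List.sorted numbers (fun x => x) false).length :=
    List.length_pos_of_ne_nil hne
  have hglmem : (PySem.List.sorted numbers (fun x => x) false).getLast hne ∈ numbers := by
    have hmem := List.getLast_mem hne
    rwa [PySem.List.mem_sorted] at hmem
  have h1 : (PySem.List.sorted numbers (fun x => x) false).getLast hne ≤ m :=
    PySem.List.max?_isMax hm _ hglmem
  have hmmem : m ∈ PySem.List.sorted numbers (fun x => x) false := by
    rw [PySem.List.mem_sorted]; exact PySem.List.max?_mem hm
  obtain ⟨p, hp, hpe⟩ := List.mem_iff_getElem.mp hmmem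
  have h2 : m ≤ (PySem.List.sorted numbers (fun x => x) false).getLast hne := by
    rw [List.getLast_eq_getElem]
    calc m = (PySem.List.sorted numbers (fun x => x) false)[p] := hpe.symm
      _ ≤ _ := PySem.List.sorted_id_getElem_mono numbers (by omega) (by omega)
  omega

-- a bucket of B's dict is a filter of the sorted list
lemma pvBucket (srt : List Int) (i : Int) :
    PySem.Dict.getD (srt.foldl (fun d item =>
        PySem.Dict.modify d (PySem.Int.floordiv item 10) [] (fun g => g ++ [item]))
        PySem.Dict.empty) i [] =
      srt.filter (fun x => decide (x ≥ i * 10 ∧ x < (i + 1) * 10)) := by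
  have hmap : srt.foldl (fun d item =>
        PySem.Dict.modify d (PySem.Int.floordiv item 10) [] (fun g => g ++ [item]))
        PySem.Dict.empty =
      (srt.map (fun x => (PySem.Int.floordiv x 10, x))).foldl
        (fun d p => PySem.Dict.modify d p.1 [] (fun g => g ++ [p.2])) PySem.Dict.empty := by
    rw [List.foldl_map]
  rw [hmap, PySem.Dict.getD_foldl_modify_append, PySem.Dict.getD_empty, List.nil_append,
    List.filter_map, List.map_map]
  show List.map (fun x => x) _ = _
  rw [List.map_id']
  apply List.filter_congr
  intro x _
  rw [Bool.eq_iff_iff]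
  simp only [Function.comp_apply, beq_iff_eq, decide_eq_true_eq]
  rw [PySem.Int.floordiv_eq_iff_of_pos (by norm_num)]

-- ===== VERDICT (by name: the statement is the Claim_ definition above) =====
theorem group_by_10s_spec : Claim_equal_group_by_10s := by
  intro numbers _ hpre
  unfold Spec_group_by_10s group_by_10s group_by_10s_alt
  have hsrtne : PySem.List.sorted numbers (fun x => x) false ≠ [] := by
    simpa [PySem.List.sorted_eq_nil_iff] using hpre
  obtain ⟨last, hlast⟩ : ∃ y,
      PySem.List.pyGet? (PySem.List.sorted numbers (fun x => x) false) (-1) = some y := by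
    rw [PySem.List.pyGet?_neg_one]
    exact ⟨_, List.getLast?_eq_some_getLast hsrtne⟩
  have hmax : PySem.List.max? numbers (fun x => x) = some last := by
    rw [pvMax_eq_getLast numbers hpre, ← PySem.List.pyGet?_neg_one, hlast]
  simp only [hlast, hmax]
  rw [PySem.List.foldl_append_singleton_eq_map, List.nil_append]
  apply List.map_congr_left
  intro i _
  rw [PySem.List.foldl_append_ite_eq_filter, List.nil_append, pvBucket]
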